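-- pv_equiv track=rewrite | github.com/981377660LMT/algorithm-study | 22_专题/离线查询/1714. 数组中特殊等间距元素的和.py | solve
-- ===== SOURCE A (Python) =====
-- from typing import List
--
-- MOD = int(1e9 + 7)
--
-- def solve(nums: List[int], queries: List[List[int]]) -> List[int]:
--     m, n = len(nums), len(queries)
--     res = [0] * n
--     # 保存前一次的start 和 res ,key为start%step 与step
--     memo = dict()
--     for i in sorted(range(n), key=lambda id: -queries[id][0]):
--         start, step = queries[i]
--         preStart, preRes = memo.get((start % step, step), (m, 0))
--         total = (sum(nums[start:preStart:step]) + preRes) % MOD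
--         res[i] = total
--         memo[(start % step, step)] = (start, total)
--     return res
-- ===== SOURCE B (Python) =====
-- from typing import List
--
-- MOD = int(1e9 + 7)
--
-- def solve(nums: List[int], queries: List[List[int]]) -> List[int]:
--     return [sum(nums[start::step]) % MOD for start, step in queries]
-- ===== Notes on version B (the rewrite author's own statement) =====
-- stated objective: simpler
-- what changed: Drops the offline processing entirely (no sorting of query indices by descending start, no memo dict of partial strided sums, no index-addressed result array): B answers each query independently and in original order as sum(nums[start::step]) % MOD, which equals A's telescoped memo value.
-- outside the precondition, e.g. on solve([1, 2, 3], [[1, 2], [-3, 2]]): A returns [2, 3], B returns [2, 4]; on solve([1, 2, 3], [[1, -1]]): A returns [0], B returns [3]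
import Mathlib
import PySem

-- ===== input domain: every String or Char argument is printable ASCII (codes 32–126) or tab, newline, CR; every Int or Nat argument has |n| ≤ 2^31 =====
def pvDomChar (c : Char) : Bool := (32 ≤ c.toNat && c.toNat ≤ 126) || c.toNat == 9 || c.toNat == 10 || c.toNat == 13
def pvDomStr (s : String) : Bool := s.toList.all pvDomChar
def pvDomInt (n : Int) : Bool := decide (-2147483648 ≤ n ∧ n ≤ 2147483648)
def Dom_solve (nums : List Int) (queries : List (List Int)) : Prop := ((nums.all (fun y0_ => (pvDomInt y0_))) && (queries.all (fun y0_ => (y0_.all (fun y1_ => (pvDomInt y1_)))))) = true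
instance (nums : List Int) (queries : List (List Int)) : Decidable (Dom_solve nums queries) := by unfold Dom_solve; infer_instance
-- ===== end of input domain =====

-- B drops A's offline machinery (sort by descending start + memo dict of partial
-- strided sums + index-addressed result array) and answers each query directly,
-- in original order, as sum(nums[start::step]) % MOD; objective: simpler.

-- ===== PORT A =====
def solve (nums : List Int) (queries : List (List Int)) : List Int :=
  let m : Nat := nums.length
  let n : Nat := queries.length
  -- sorted(range(n), key=lambda id: -queries[id][0])
  let order := PySem.List.sorted (PySem.List.pyRange 0 (n : Int) 1)
      (fun id => -(PySem.List.pyGetD (PySem.List.pyGetD queries id []) 0 0))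
  let fin := order.foldl
    (fun (st : List Int × PySem.Dict (Int × Int) (Int × Int)) i =>
      let q := PySem.List.pyGetD queries i []
      let start := PySem.List.pyGetD q 0 0
      let step := PySem.List.pyGetD q 1 0
      -- Python raises ZeroDivisionError at 'start % step' when step = 0 (outside Pre_)
      let key : Int × Int := (PySem.Int.mod start step, step)
      let pre := PySem.Dict.getD st.2 key ((m : Int), 0)
      let total := PySem.Int.mod
        (((PySem.List.slice? nums (some start) (some pre.1) step).getD []).sum + pre.2)
        1000000007
      (PySem.List.pySetD st.1 i total, PySem.Dict.insert st.2 key (start, total)))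
    (List.replicate n 0, PySem.Dict.empty)
  fin.1

-- ===== PORT B =====
def solve_alt (nums : List Int) (queries : List (List Int)) : List Int :=
  queries.map (fun q =>
    let start := PySem.List.pyGetD q 0 0
    let step := PySem.List.pyGetD q 1 0
    PySem.Int.mod ((PySem.List.slice? nums (some start) none step).getD []).sum 1000000007)

-- ===== PRECONDITION & SPEC =====
-- Pre_ requires each query to have exactly two entries and step ≠ 0 (otherwise A
-- raises ValueError resp. ZeroDivisionError) and admits: empty nums (both sides
-- yield all zeros), the task's stated domain 0 ≤ start ∧ 1 ≤ step, and any starts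
-- with 1 ≤ step when no two queries share a memo key.  Excluded while A returns:
-- negative step, and negative start combined with a repeated (start%step, step)
-- key, where A's value is an artefact of Python's negative-index slice clamping
-- interacting with the cross-query memo.
def Pre_solve (nums : List Int) (queries : List (List Int)) : Prop :=
  (∀ q ∈ queries, q.length = 2 ∧ q.getD 1 0 ≠ 0) ∧
    (nums = []
      ∨ (∀ q ∈ queries, 0 ≤ q.getD 0 0 ∧ 1 ≤ q.getD 1 0)
      ∨ ((∀ q ∈ queries, 1 ≤ q.getD 1 0) ∧
          (queries.map (fun q =>
            (PySem.Int.mod (q.getD 0 0) (q.getD 1 0), q.getD 1 0))).Nodup))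
instance (nums : List Int) (queries : List (List Int)) : Decidable (Pre_solve nums queries) := by unfold Pre_solve; infer_instance

def pvWitness_solve : List Int × List (List Int) := ([1, 2, 3], [[0, 2], [1, 1], [5, 2]])

def Spec_solve (nums : List Int) (queries : List (List Int)) (out : List Int) : Prop := out = solve_alt nums queries
instance (nums : List Int) (queries : List (List Int)) (out : List Int) : Decidable (Spec_solve nums queries out) := by unfold Spec_solve; infer_instance

-- ===== CLAIM (what is proved, stated in full; the proofs are below) =====
def Claim_equal_solve : Prop := ∀ (nums : List Int) (queries : List (List Int)), Dom_solve nums queries → Pre_solve nums queries → Spec_solve nums queries (solve nums queries)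

-- ===== LEMMAS AND PROOFS =====

-- the strided sublist of xs at indices i, i+(st+1), i+2(st+1), … below e (and below xs.length)
def sl (xs : List Int) (st : Nat) (i e : Nat) : List Int :=
  if h : i < e ∧ i < xs.length then xs[i]'h.2 :: sl xs st (i + st + 1) e else []
termination_by e - i
decreasing_by omega

lemma sl_nil (xs : List Int) (st i e : Nat) (h : e ≤ i) : sl xs st i e = [] := by
  rw [sl]; simp; omega

lemma sl_clamp_start (xs : List Int) (st a : Nat) :
    sl xs st (min a xs.length) xs.length = sl xs st a xs.length := by
  by_cases h : a ≤ xs.length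
  · rw [min_eq_left h]
  · rw [min_eq_right (by omega), sl_nil _ _ _ _ le_rfl, sl_nil]; omega

-- strided suffix sum from index i with step st+1
def SF (xs : List Int) (st : Nat) (i : Nat) : Int := (sl xs st i xs.length).sum

-- B's value for a query (start, step)
def MVal (nums : List Int) (s stp : Int) : Int :=
  PySem.Int.mod (SF nums (stp.toNat - 1) s.toNat) 1000000007

-- core: the filterMap/range form used by slice? equals sl
lemma core (xs : List Int) (st : Nat) :
    ∀ d a e, e - a ≤ d → e ≤ xs.length →
      (List.range (if a < e then (e - a + st) / (st + 1) else 0)).filterMap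
          (fun k => xs[a + (st + 1) * k]?) = sl xs st a e := by
  intro d
  induction d with
  | zero =>
    intro a e h1 h2
    rw [if_neg (by omega), sl_nil xs st a e (by omega)]
    simp
  | succ d ih =>
    intro a e h1 h2
    by_cases hae : a < e
    · have ha : a < xs.length := by omega
      have hsplit : (e - a + st) / (st + 1)
          = (if a + st + 1 < e then (e - (a + st + 1) + st) / (st + 1) else 0) + 1 := by
        by_cases h3 : a + st + 1 < e
        · have hnum : e - a + st = (e - (a + st + 1) + st) + (st + 1) := by omega
          rw [hnum, Nat.add_div_right _ (by omega), if_pos h3]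
        · rw [if_neg h3]
          exact Nat.div_eq_of_lt_le (by omega) (by omega)
      rw [if_pos hae, hsplit, List.range_succ_eq_map]
      have h0 : xs[a + (st + 1) * 0]? = some (xs[a]'ha) := by
        simp [List.getElem?_eq_getElem ha]
      simp only [List.filterMap_cons, h0, List.filterMap_map]
      rw [sl, dif_pos ⟨hae, ha⟩]
      congr 1
      have hcg : ∀ k ∈ List.range (if a + st + 1 < e then (e - (a + st + 1) + st) / (st + 1) else 0),
          ((fun k => xs[a + (st + 1) * k]?) ∘ Nat.succ) k = xs[(a + st + 1) + (st + 1) * k]? := by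
        intro k _
        have : a + (st + 1) * (k + 1) = (a + st + 1) + (st + 1) * k := by ring
        simp only [Function.comp, Nat.succ_eq_add_one, this]
      rw [List.filterMap_congr hcg]
      exact ih (a + st + 1) e (by omega) h2
    · rw [if_neg hae, sl_nil xs st a e (by omega)]
      simp

lemma slice?_pos_eq_sl (xs : List Int) (a b st : Nat) :
    PySem.List.slice? xs (some (a : Int)) (some (b : Int)) ((st : Int) + 1)
      = some (sl xs st (min a xs.length) (min b xs.length)) := by
  simp only [PySem.List.slice?, PySem.List.sliceIndices]
  rw [if_neg (by omega : ¬ ((st : Int) + 1 = 0)), if_pos (by omega : (0:Int) < (st : Int) + 1),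
    if_neg (by omega : ¬ ((a : Int) < 0)), if_neg (by omega : ¬ ((b : Int) < 0))]
  rw [if_neg (by omega : ¬ ((st : Int) + 1 < 0))]
  have ha' : min (a : Int) (xs.length : Int) = ((min a xs.length : Nat) : Int) := by omega
  have hb' : min (b : Int) (xs.length : Int) = ((min b xs.length : Nat) : Int) := by omega
  rw [ha', hb']
  congr 1
  have hcount : (if ((min a xs.length : Nat) : Int) < ((min b xs.length : Nat) : Int) then
        ((((min b xs.length : Nat) : Int) - ((min a xs.length : Nat) : Int) + ((st : Int) + 1) - 1)
          / ((st : Int) + 1)).toNat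
      else 0)
      = (if min a xs.length < min b xs.length
          then (min b xs.length - min a xs.length + st) / (st + 1) else 0) := by
    by_cases hlt : min a xs.length < min b xs.length
    · rw [if_pos (by exact_mod_cast hlt), if_pos hlt]
      have hnum : ((min b xs.length : Nat) : Int) - ((min a xs.length : Nat) : Int)
          + ((st : Int) + 1) - 1 = ((min b xs.length - min a xs.length + st : Nat) : Int) := by
        omega
      rw [hnum, (by omega : ((st : Int) + 1) = ((st + 1 : Nat) : Int)), ← Int.natCast_div]
      exact Int.toNat_natCast _
    · rw [if_neg (by exact_mod_cast hlt), if_neg hlt]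
  rw [hcount]
  have hfun : ∀ k ∈ List.range (if min a xs.length < min b xs.length
        then (min b xs.length - min a xs.length + st) / (st + 1) else 0),
      xs[(((min a xs.length : Nat) : Int) + ((st : Int) + 1) * (k : Int)).toNat]?
        = xs[min a xs.length + (st + 1) * k]? := by
    intro k _
    have hidx : (((min a xs.length : Nat) : Int) + ((st : Int) + 1) * (k : Int)).toNat
        = min a xs.length + (st + 1) * k := by
      have : ((st : Int) + 1) * (k : Int) = (((st + 1) * k : Nat) : Int) := by push_cast; ring
      omega
    rw [hidx]
  rw [List.filterMap_congr hfun]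
  exact core xs st (min b xs.length - min a xs.length) (min a xs.length) (min b xs.length)
    le_rfl (by omega)

lemma slice?_none_eq_sl (xs : List Int) (a st : Nat) :
    PySem.List.slice? xs (some (a : Int)) none ((st : Int) + 1)
      = some (sl xs st a xs.length) := by
  simp only [PySem.List.slice?, PySem.List.sliceIndices]
  rw [if_neg (by omega : ¬ ((st : Int) + 1 = 0)), if_pos (by omega : (0:Int) < (st : Int) + 1),
    if_neg (by omega : ¬ ((a : Int) < 0))]
  simp only [if_neg (show ¬ ((st : Int) + 1 < 0) by omega)]
  have ha' : min (a : Int) (xs.length : Int) = ((min a xs.length : Nat) : Int) := by omega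
  rw [ha']
  rw [← sl_clamp_start xs st a]
  congr 1
  have hcount : (if ((min a xs.length : Nat) : Int) < (xs.length : Int) then
        (((xs.length : Int) - ((min a xs.length : Nat) : Int) + ((st : Int) + 1) - 1)
          / ((st : Int) + 1)).toNat
      else 0)
      = (if min a xs.length < xs.length
          then (xs.length - min a xs.length + st) / (st + 1) else 0) := by
    by_cases hlt : min a xs.length < xs.length
    · rw [if_pos (by exact_mod_cast hlt), if_pos hlt]
      have hnum : (xs.length : Int) - ((min a xs.length : Nat) : Int)
          + ((st : Int) + 1) - 1 = ((xs.length - min a xs.length + st : Nat) : Int) := by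
        omega
      rw [hnum, (by omega : ((st : Int) + 1) = ((st + 1 : Nat) : Int)), ← Int.natCast_div]
      exact Int.toNat_natCast _
    · rw [if_neg (by exact_mod_cast hlt), if_neg hlt]
  rw [hcount]
  have hfun : ∀ k ∈ List.range (if min a xs.length < xs.length
        then (xs.length - min a xs.length + st) / (st + 1) else 0),
      xs[(((min a xs.length : Nat) : Int) + ((st : Int) + 1) * (k : Int)).toNat]?
        = xs[min a xs.length + (st + 1) * k]? := by
    intro k _
    have hidx : (((min a xs.length : Nat) : Int) + ((st : Int) + 1) * (k : Int)).toNat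
        = min a xs.length + (st + 1) * k := by
      have : ((st : Int) + 1) * (k : Int) = (((st + 1) * k : Nat) : Int) := by push_cast; ring
      omega
    rw [hidx]
  rw [List.filterMap_congr hfun]
  exact core xs st (xs.length - min a xs.length) (min a xs.length) xs.length
    le_rfl le_rfl

-- telescoping: a strided slice up to b followed by the strided suffix from b is the suffix from a
lemma tele (xs : List Int) (st : Nat) :
    ∀ d a b, b - a ≤ d → a ≤ b → b ≤ xs.length → (st + 1) ∣ (b - a) →
      sl xs st a b ++ sl xs st b xs.length = sl xs st a xs.length := by
  intro d
  induction d with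
  | zero =>
    intro a b h1 h2 h3 h4
    have hab : a = b := by omega
    subst hab
    rw [sl_nil xs st a a le_rfl, List.nil_append]
  | succ d ih =>
    intro a b h1 h2 h3 h4
    by_cases hab : a < b
    · have hstep : a + st + 1 ≤ b := by
        rcases h4 with ⟨c, hc⟩
        cases c with
        | zero => omega
        | succ c' =>
          have hx : (st + 1) * (c' + 1) = (st + 1) + (st + 1) * c' := by ring
          omega
      have ha : a < xs.length := by omega
      rw [sl, dif_pos ⟨hab, ha⟩]
      conv_rhs => rw [sl, dif_pos ⟨(by omega : a < xs.length), ha⟩]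
      rw [List.cons_append]
      congr 1
      refine ih (a + st + 1) b (by omega) hstep h3 ?_
      rcases h4 with ⟨c, hc⟩
      cases c with
      | zero => omega
      | succ c' =>
        refine ⟨c', ?_⟩
        have hx : (st + 1) * (c' + 1) = (st + 1) + (st + 1) * c' := by ring
        omega
    · have hab' : a = b := by omega
      subst hab'
      rw [sl_nil xs st a a le_rfl, List.nil_append]

lemma mod_absorb (x y : Int) :
    PySem.Int.mod (x + PySem.Int.mod y 1000000007) 1000000007
      = PySem.Int.mod (x + y) 1000000007 := by
  rw [PySem.Int.mod_eq_emod_of_pos (by norm_num), PySem.Int.mod_eq_emod_of_pos (by norm_num),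
    PySem.Int.mod_eq_emod_of_pos (by norm_num)]
  omega

-- the default (m, 0) memo branch computes B's value
lemma total_default (nums : List Int) (start stp : Int) (h0 : 0 ≤ start) (h1 : 1 ≤ stp) :
    PySem.Int.mod
        (((PySem.List.slice? nums (some start) (some (nums.length : Int)) stp).getD []).sum + 0)
        1000000007
      = MVal nums start stp := by
  have hst : stp = ((stp.toNat - 1 : Nat) : Int) + 1 := by omega
  have hs : start = ((start.toNat : Nat) : Int) := by omega
  rw [add_zero, hst, hs, slice?_pos_eq_sl nums start.toNat nums.length (stp.toNat - 1)]
  simp only [Option.getD_some, min_self, sl_clamp_start]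
  unfold MVal SF
  simp only [Int.toNat_natCast,
    (by omega : (((stp.toNat - 1 : Nat) : Int) + 1).toNat - 1 = stp.toNat - 1)]

-- the memo branch computes B's value
lemma total_memo (nums : List Int) (start stp preS preT : Int)
    (h0 : 0 ≤ start) (h1 : 1 ≤ stp) (hle : start ≤ preS)
    (hcong : PySem.Int.mod preS stp = PySem.Int.mod start stp)
    (ht : preT = MVal nums preS stp) :
    PySem.Int.mod
        (((PySem.List.slice? nums (some start) (some preS) stp).getD []).sum + preT)
        1000000007
      = MVal nums start stp := by
  have hst : stp = ((stp.toNat - 1 : Nat) : Int) + 1 := by omega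
  have hs : start = ((start.toNat : Nat) : Int) := by omega
  have hp : preS = ((preS.toNat : Nat) : Int) := by omega
  have hd : (stp.toNat - 1) + 1 ∣ (preS.toNat - start.toNat) := by
    have hm : Int.ModEq stp start preS := by
      unfold Int.ModEq
      rw [← PySem.Int.mod_eq_emod_of_pos (by omega), ← PySem.Int.mod_eq_emod_of_pos (by omega)]
      exact hcong.symm
    have hdvd : stp ∣ preS - start := Int.ModEq.dvd hm
    have hcast : preS - start = ((preS.toNat - start.toNat : Nat) : Int) := by omega
    have hcast2 : stp = (((stp.toNat - 1) + 1 : Nat) : Int) := by omega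
    rw [hcast, hcast2] at hdvd
    exact_mod_cast hdvd
  rw [hst, hs, hp, slice?_pos_eq_sl nums start.toNat preS.toNat (stp.toNat - 1)]
  simp only [Option.getD_some]
  unfold MVal at ht ⊢
  simp only [Int.toNat_natCast, (by omega : (((stp.toNat - 1 : Nat) : Int) + 1).toNat - 1 = stp.toNat - 1)] at ht ⊢
  rcases Nat.lt_or_ge preS.toNat nums.length with hb | hb
  case inr =>
    rw [min_eq_right hb, sl_clamp_start]
    unfold SF at ht
    rw [sl_nil nums (stp.toNat - 1) preS.toNat nums.length hb] at ht
    simp only [List.sum_nil] at ht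
    rw [ht]
    unfold SF
    norm_num [PySem.Int.mod]
  case inl =>
    have haleb : start.toNat ≤ preS.toNat := by omega
    have han : min start.toNat nums.length = start.toNat := by omega
    rw [min_eq_left hb.le, han]
    rw [ht, mod_absorb]
    unfold SF
    have htele := tele nums (stp.toNat - 1) (preS.toNat - start.toNat) start.toNat preS.toNat
      le_rfl haleb hb.le hd
    have hsum : (sl nums (stp.toNat - 1) start.toNat preS.toNat).sum
        + (sl nums (stp.toNat - 1) preS.toNat nums.length).sum
        = (sl nums (stp.toNat - 1) start.toNat nums.length).sum := by
      rw [← List.sum_append, htele]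
    rw [← hsum]

-- A's fold state transformer, named for the proofs (definitionally the lambda in solve)
def stepFn (nums : List Int) (queries : List (List Int))
    (st : List Int × PySem.Dict (Int × Int) (Int × Int)) (i : Int) :
    List Int × PySem.Dict (Int × Int) (Int × Int) :=
  let q := PySem.List.pyGetD queries i []
  let start := PySem.List.pyGetD q 0 0
  let step := PySem.List.pyGetD q 1 0
  let key : Int × Int := (PySem.Int.mod start step, step)
  let pre := PySem.Dict.getD st.2 key ((nums.length : Int), 0)
  let total := PySem.Int.mod
    (((PySem.List.slice? nums (some start) (some pre.1) step).getD []).sum + pre.2)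
    1000000007
  (PySem.List.pySetD st.1 i total, PySem.Dict.insert st.2 key (start, total))

def qstart (queries : List (List Int)) (i : Int) : Int :=
  PySem.List.pyGetD (PySem.List.pyGetD queries i []) 0 0
def qstep (queries : List (List Int)) (i : Int) : Int :=
  PySem.List.pyGetD (PySem.List.pyGetD queries i []) 1 0
def qkey (queries : List (List Int)) (i : Int) : Int × Int :=
  (PySem.Int.mod (qstart queries i) (qstep queries i), qstep queries i)

def F (nums : List Int) (queries : List (List Int)) (i : Int) : Int :=
  MVal nums (qstart queries i) (qstep queries i)

-- memo invariant: every entry stores a nonneg start with the key's residue and B's value,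
-- and dominates the start of every still-unprocessed query with the same key
def MemoInv (nums : List Int) (queries : List (List Int))
    (memo : PySem.Dict (Int × Int) (Int × Int)) (rest : List Int) : Prop :=
  ∀ k v, memo.get? k = some v →
    1 ≤ k.2 ∧ 0 ≤ v.1 ∧ PySem.Int.mod v.1 k.2 = k.1 ∧ v.2 = MVal nums v.1 k.2 ∧
      ∀ j ∈ rest, qkey queries j = k → qstart queries j ≤ v.1

lemma fold_res (nums : List Int) (queries : List (List Int))
    (hpre : ∀ q ∈ queries, q.length = 2 ∧ 0 ≤ q.getD 0 0 ∧ 1 ≤ q.getD 1 0) :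
    ∀ (ids : List Int) (res : List Int) (memo : PySem.Dict (Int × Int) (Int × Int)),
      (∀ j ∈ ids, 0 ≤ j ∧ j < (queries.length : Int)) →
      ids.Pairwise (fun i j => qstart queries j ≤ qstart queries i) →
      MemoInv nums queries memo ids →
      (ids.foldl (stepFn nums queries) (res, memo)).1
        = ids.foldl (fun r i => PySem.List.pySetD r i (F nums queries i)) res := by
  intro ids
  induction ids with
  | nil => intro res memo _ _ _; rfl
  | cons i t ih =>
    intro res memo hmem hpair hinv
    obtain ⟨hi0, hin⟩ := hmem i (List.mem_cons_self)
    have hq : PySem.List.pyGetD queries i [] = queries[i.toNat]'(by omega) :=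
      PySem.List.pyGetD_eq_getElem _ _ hi0 hin
    obtain ⟨hlen2, hs0, hs1⟩ := hpre _ (hq ▸ List.getElem_mem _)
    have hqs : qstart queries i = (PySem.List.pyGetD queries i []).getD 0 0 := by
      unfold qstart; rw [PySem.List.pyGetD_zero]
    have hqt : qstep queries i = (PySem.List.pyGetD queries i []).getD 1 0 := by
      unfold qstep
      rw [(by norm_num : (1 : Int) = ((1 : Nat) : Int)), PySem.List.pyGetD_natCast]
    have hstart0 : 0 ≤ qstart queries i := by rw [hqs]; exact hs0
    have hstep1 : 1 ≤ qstep queries i := by rw [hqt]; exact hs1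
    simp only [List.foldl_cons]
    -- the total computed by stepFn at i is B's value F i
    have htot : stepFn nums queries (res, memo) i
        = (PySem.List.pySetD res i (F nums queries i),
           PySem.Dict.insert memo (qkey queries i) (qstart queries i, F nums queries i)) := by
      have harg : PySem.Int.mod
          (((PySem.List.slice? nums (some (qstart queries i))
              (some (PySem.Dict.getD memo (qkey queries i) ((nums.length : Int), 0)).1)
              (qstep queries i)).getD []).sum
            + (PySem.Dict.getD memo (qkey queries i) ((nums.length : Int), 0)).2) 1000000007
          = F nums queries i := by
        unfold PySem.Dict.getD
        cases hm : memo.get? (qkey queries i) with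
        | none =>
          simp only [Option.getD_none]
          exact total_default nums (qstart queries i) (qstep queries i) hstart0 hstep1
        | some v =>
          simp only [Option.getD_some]
          obtain ⟨hk1, hv0, hvres, hvval, hdom⟩ := hinv _ _ hm
          have hdomi : qstart queries i ≤ v.1 := hdom i (List.mem_cons_self) rfl
          have hcong : PySem.Int.mod v.1 (qstep queries i) = PySem.Int.mod (qstart queries i) (qstep queries i) := hvres
          exact total_memo nums (qstart queries i) (qstep queries i) v.1 v.2
            hstart0 hstep1 hdomi hcong hvval
      have hraw : stepFn nums queries (res, memo) i
          = (PySem.List.pySetD res i (PySem.Int.mod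
              (((PySem.List.slice? nums (some (qstart queries i))
                  (some (PySem.Dict.getD memo (qkey queries i) ((nums.length : Int), 0)).1)
                  (qstep queries i)).getD []).sum
                + (PySem.Dict.getD memo (qkey queries i) ((nums.length : Int), 0)).2) 1000000007),
             PySem.Dict.insert memo (qkey queries i) (qstart queries i, PySem.Int.mod
              (((PySem.List.slice? nums (some (qstart queries i))
                  (some (PySem.Dict.getD memo (qkey queries i) ((nums.length : Int), 0)).1)
                  (qstep queries i)).getD []).sum
                + (PySem.Dict.getD memo (qkey queries i) ((nums.length : Int), 0)).2) 1000000007)) := rfl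
      rw [hraw, harg]
    rw [htot]
    refine ih (PySem.List.pySetD res i (F nums queries i)) _
      (fun j hj => hmem j (List.mem_cons_of_mem _ hj)) (List.pairwise_cons.mp hpair).2 ?_
    -- the inserted memo still satisfies the invariant for the remaining ids
    intro k v hv
    by_cases hk : k = qkey queries i
    · subst hk
      rw [PySem.Dict.get?_insert_self] at hv
      cases hv
      refine ⟨hstep1, hstart0, rfl, rfl, ?_⟩
      intro j hj _
      exact (List.pairwise_cons.mp hpair).1 j hj
    · rw [PySem.Dict.get?_insert_of_ne memo _ hk] at hv
      obtain ⟨hk1, hv0, hvres, hvval, hdom⟩ := hinv _ _ hv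
      exact ⟨hk1, hv0, hvres, hvval, fun j hj hkj => hdom j (List.mem_cons_of_mem _ hj) hkj⟩

lemma writes_len (F' : Int → Int) :
    ∀ (ids : List Int) (res : List Int),
      (ids.foldl (fun r i => PySem.List.pySetD r i (F' i)) res).length = res.length := by
  intro ids
  induction ids with
  | nil => intro res; rfl
  | cons i t ih =>
    intro res
    simp only [List.foldl_cons, ih, PySem.List.length_pySetD]

lemma writes_get (F' : Int → Int) :
    ∀ (ids : List Int) (res : List Int) (p : Nat),
      (∀ j ∈ ids, 0 ≤ j) → p < res.length →
      (ids.foldl (fun r i => PySem.List.pySetD r i (F' i)) res)[p]?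
        = if (p : Int) ∈ ids then some (F' p) else res[p]? := by
  intro ids
  induction ids with
  | nil => intro res p _ hp; simp
  | cons i t ih =>
    intro res p h0 hp
    have hi0 : 0 ≤ i := h0 i (List.mem_cons_self)
    simp only [List.foldl_cons]
    rw [ih (PySem.List.pySetD res i (F' i)) p
      (fun j hj => h0 j (List.mem_cons_of_mem _ hj))
      (by rw [PySem.List.length_pySetD]; exact hp)]
    by_cases hmem : (p : Int) ∈ t
    · rw [if_pos hmem, if_pos (List.mem_cons_of_mem _ hmem)]
    · rw [if_neg hmem, PySem.List.pySetD_of_nonneg _ _ hi0]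
      by_cases hpi : (p : Int) = i
      · have hip : i.toNat = p := by omega
        rw [if_pos (by rw [← hpi]; exact List.mem_cons_self), hip, ← hpi]
        simp [hp]
      · have hip : i.toNat ≠ p := by omega
        rw [if_neg (by simp [hpi, hmem])]
        simp [hip]

lemma final_assembly (nums : List Int) (queries : List (List Int))
    (hpre : ∀ q ∈ queries, q.length = 2 ∧ 0 ≤ q.getD 0 0 ∧ 1 ≤ q.getD 1 0) :
    solve nums queries = solve_alt nums queries := by
  have hsolve : solve nums queries
      = ((PySem.List.sorted (PySem.List.pyRange 0 (queries.length : Int) 1)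
            (fun id => -(qstart queries id))).foldl (stepFn nums queries)
          (List.replicate queries.length 0, PySem.Dict.empty)).1 := rfl
  set order := PySem.List.sorted (PySem.List.pyRange 0 (queries.length : Int) 1)
      (fun id => -(qstart queries id)) with horder
  have horder_mem : ∀ j ∈ order, 0 ≤ j ∧ j < (queries.length : Int) := by
    intro j hj
    rw [horder, PySem.List.mem_sorted, PySem.List.mem_pyRange_one] at hj
    exact hj
  have hpair : order.Pairwise (fun i j => qstart queries j ≤ qstart queries i) := by
    have h := PySem.List.sorted_pairwise (PySem.List.pyRange 0 (queries.length : Int) 1)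
      (fun id => -(qstart queries id))
    exact h.imp (fun hab => by omega)
  have hinv0 : MemoInv nums queries PySem.Dict.empty order := by
    intro k v hv
    simp [PySem.Dict.get?, PySem.Dict.empty] at hv
  rw [hsolve, fold_res nums queries hpre order _ _ horder_mem hpair hinv0]
  have hlen : (order.foldl (fun r i => PySem.List.pySetD r i (F nums queries i))
      (List.replicate queries.length 0)).length = queries.length := by
    rw [writes_len, List.length_replicate]
  apply List.ext_getElem?
  intro p
  by_cases hpn : p < queries.length
  · rw [writes_get (F nums queries) order _ p (fun j hj => (horder_mem j hj).1)
      (by rw [List.length_replicate]; exact hpn)]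
    have hpmem : (p : Int) ∈ order := by
      rw [horder, PySem.List.mem_sorted, PySem.List.mem_pyRange_one]
      constructor <;> omega
    rw [if_pos hpmem]
    have hq : PySem.List.pyGetD queries ((p : Nat) : Int) [] = queries[p] := by
      rw [PySem.List.pyGetD_natCast, List.getD_eq_getElem?_getD, List.getElem?_eq_getElem hpn,
        Option.getD_some]
    obtain ⟨hlen2, hs0, hs1⟩ := hpre _ (List.getElem_mem hpn)
    have hqs : qstart queries (p : Int) = queries[p].getD 0 0 := by
      unfold qstart; rw [hq, PySem.List.pyGetD_zero]
    have hqt : qstep queries (p : Int) = queries[p].getD 1 0 := by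
      unfold qstep
      rw [hq, (by norm_num : (1 : Int) = ((1 : Nat) : Int)), PySem.List.pyGetD_natCast]
    have halt : (solve_alt nums queries)[p]?
        = some (PySem.Int.mod ((PySem.List.slice? nums
            (some (PySem.List.pyGetD queries[p] 0 0)) none
            (PySem.List.pyGetD queries[p] 1 0)).getD []).sum 1000000007) := by
      unfold solve_alt
      rw [List.getElem?_map, List.getElem?_eq_getElem hpn, Option.map_some]
    rw [halt, PySem.List.pyGetD_zero,
      (by norm_num : (1 : Int) = ((1 : Nat) : Int)), PySem.List.pyGetD_natCast]
    congr 1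
    -- F at p is exactly B's per-query value
    have hs : queries[p].getD 0 0 = (((queries[p].getD 0 0).toNat : Nat) : Int) := by
      omega
    have ht : queries[p].getD 1 0 = (((queries[p].getD 1 0).toNat - 1 : Nat) : Int) + 1 := by
      omega
    unfold F MVal SF
    rw [hqs, hqt]
    conv_rhs => rw [hs, ht, slice?_none_eq_sl nums ((queries[p].getD 0 0).toNat)
      ((queries[p].getD 1 0).toNat - 1)]
    simp only [Option.getD_some]
  · rw [List.getElem?_eq_none (by omega : (order.foldl (fun r i => PySem.List.pySetD r i
        (F nums queries i)) (List.replicate queries.length 0)).length ≤ p)]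
    rw [List.getElem?_eq_none (by simp only [solve_alt, List.length_map]; omega)]

lemma slice_sum_nil (a? b? : Option Int) (st : Int) :
    ((PySem.List.slice? ([] : List Int) a? b? st).getD []).sum = 0 := by
  simp only [PySem.List.slice?]
  by_cases h : st = 0
  · rw [if_pos h]; rfl
  · rw [if_neg h]
    simp

lemma fold_res_nil (queries : List (List Int)) :
    ∀ (ids : List Int) (res : List Int) (memo : PySem.Dict (Int × Int) (Int × Int)),
      (∀ k v, memo.get? k = some v → v.2 = 0) →
      (ids.foldl (stepFn [] queries) (res, memo)).1
        = ids.foldl (fun r i => PySem.List.pySetD r i 0) res := by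
  intro ids
  induction ids with
  | nil => intro res memo _; rfl
  | cons i t ih =>
    intro res memo hinv
    simp only [List.foldl_cons]
    have hpre2 : (PySem.Dict.getD memo (qkey queries i) (((0 : Nat) : Int), 0)).2 = 0 := by
      unfold PySem.Dict.getD
      cases hm : memo.get? (qkey queries i) with
      | none => rfl
      | some v => simpa using hinv _ _ hm
    have htot : stepFn [] queries (res, memo) i
        = (PySem.List.pySetD res i 0,
           PySem.Dict.insert memo (qkey queries i) (qstart queries i, 0)) := by
      have hraw : stepFn [] queries (res, memo) i
          = (PySem.List.pySetD res i (PySem.Int.mod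
              (((PySem.List.slice? ([] : List Int) (some (qstart queries i))
                  (some (PySem.Dict.getD memo (qkey queries i) (((0 : Nat) : Int), 0)).1)
                  (qstep queries i)).getD []).sum
                + (PySem.Dict.getD memo (qkey queries i) (((0 : Nat) : Int), 0)).2) 1000000007),
             PySem.Dict.insert memo (qkey queries i) (qstart queries i, PySem.Int.mod
              (((PySem.List.slice? ([] : List Int) (some (qstart queries i))
                  (some (PySem.Dict.getD memo (qkey queries i) (((0 : Nat) : Int), 0)).1)
                  (qstep queries i)).getD []).sum
                + (PySem.Dict.getD memo (qkey queries i) (((0 : Nat) : Int), 0)).2) 1000000007)) := rfl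
      rw [hraw, slice_sum_nil, hpre2]
      norm_num [PySem.Int.mod]
    rw [htot]
    refine ih (PySem.List.pySetD res i 0) _ ?_
    intro k v hv
    by_cases hk : k = qkey queries i
    · subst hk
      rw [PySem.Dict.get?_insert_self] at hv
      cases hv
      rfl
    · rw [PySem.Dict.get?_insert_of_ne memo _ hk] at hv
      exact hinv _ _ hv

lemma final_assembly_nil (queries : List (List Int)) :
    solve [] queries = solve_alt [] queries := by
  have hsolve : solve [] queries
      = ((PySem.List.sorted (PySem.List.pyRange 0 (queries.length : Int) 1)
            (fun id => -(qstart queries id))).foldl (stepFn [] queries)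
          (List.replicate queries.length 0, PySem.Dict.empty)).1 := rfl
  set order := PySem.List.sorted (PySem.List.pyRange 0 (queries.length : Int) 1)
      (fun id => -(qstart queries id)) with horder
  have horder_mem : ∀ j ∈ order, 0 ≤ j ∧ j < (queries.length : Int) := by
    intro j hj
    rw [horder, PySem.List.mem_sorted, PySem.List.mem_pyRange_one] at hj
    exact hj
  rw [hsolve, fold_res_nil queries order _ _ (by intro k v hv; simp [PySem.Dict.get?, PySem.Dict.empty] at hv)]
  apply List.ext_getElem?
  intro p
  by_cases hpn : p < queries.length
  · have hwr := writes_get (fun _ => 0) order (List.replicate queries.length 0) p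
      (fun j hj => (horder_mem j hj).1) (by rw [List.length_replicate]; exact hpn)
    rw [hwr]
    have hpmem : (p : Int) ∈ order := by
      rw [horder, PySem.List.mem_sorted, PySem.List.mem_pyRange_one]
      constructor <;> omega
    rw [if_pos hpmem]
    unfold solve_alt
    rw [List.getElem?_map, List.getElem?_eq_getElem hpn, Option.map_some]
    have : ((PySem.List.slice? ([] : List Int) (some (PySem.List.pyGetD queries[p] 0 0)) none
        (PySem.List.pyGetD queries[p] 1 0)).getD []).sum = 0 := slice_sum_nil _ _ _
    show some 0 = some (PySem.Int.mod _ 1000000007)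
    rw [this]
    norm_num [PySem.Int.mod]
  · have hlenw : (order.foldl (fun r i => PySem.List.pySetD r i (0 : Int))
        (List.replicate queries.length (0 : Int))).length = queries.length := by
      simpa using writes_len (fun _ => 0) order (List.replicate queries.length 0)
    rw [List.getElem?_eq_none (by omega), List.getElem?_eq_none
      (by simp only [solve_alt, List.length_map]; omega)]

-- for a positive step an explicit stop of len(nums) is the same slice as no stop
lemma slice?_stop_len (xs : List Int) (a st : Int) (hst : 0 < st) :
    PySem.List.slice? xs (some a) (some (xs.length : Int)) st
      = PySem.List.slice? xs (some a) none st := by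
  simp only [PySem.List.slice?, PySem.List.sliceIndices]
  rw [if_neg (by omega : ¬ ((xs.length : Int) < 0))]
  simp only [if_neg (show ¬ (st < 0) by omega), min_self]

-- when no unprocessed query's key is in the memo, every lookup takes the default
lemma fold_res_nodup_aux (nums : List Int) (queries : List (List Int))
    (hq2 : ∀ q ∈ queries, q.length = 2 ∧ 1 ≤ q.getD 1 0) :
    ∀ (ids : List Int) (res : List Int) (memo : PySem.Dict (Int × Int) (Int × Int)),
      (∀ j ∈ ids, 0 ≤ j ∧ j < (queries.length : Int)) →
      ids.Pairwise (fun i j => qkey queries i ≠ qkey queries j) →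
      (∀ j ∈ ids, memo.get? (qkey queries j) = none) →
      (ids.foldl (stepFn nums queries) (res, memo)).1
        = ids.foldl (fun r i => PySem.List.pySetD r i (PySem.Int.mod
            ((PySem.List.slice? nums (some (qstart queries i)) none
              (qstep queries i)).getD []).sum 1000000007)) res := by
  intro ids
  induction ids with
  | nil => intro res memo _ _ _; rfl
  | cons i t ih =>
    intro res memo hmem hpair hnone
    obtain ⟨hi0, hin⟩ := hmem i (List.mem_cons_self)
    have hq : PySem.List.pyGetD queries i [] = queries[i.toNat]'(by omega) :=
      PySem.List.pyGetD_eq_getElem _ _ hi0 hin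
    obtain ⟨hlen2, hs1⟩ := hq2 _ (hq ▸ List.getElem_mem _)
    have hstep1 : 1 ≤ qstep queries i := by
      unfold qstep
      rw [(by norm_num : (1 : Int) = ((1 : Nat) : Int)), PySem.List.pyGetD_natCast]
      exact hs1
    simp only [List.foldl_cons]
    have htot : stepFn nums queries (res, memo) i
        = (PySem.List.pySetD res i (PySem.Int.mod
            ((PySem.List.slice? nums (some (qstart queries i)) none
              (qstep queries i)).getD []).sum 1000000007),
           PySem.Dict.insert memo (qkey queries i) (qstart queries i, PySem.Int.mod
            ((PySem.List.slice? nums (some (qstart queries i)) none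
              (qstep queries i)).getD []).sum 1000000007)) := by
      have hraw : stepFn nums queries (res, memo) i
          = (PySem.List.pySetD res i (PySem.Int.mod
              (((PySem.List.slice? nums (some (qstart queries i))
                  (some (PySem.Dict.getD memo (qkey queries i) ((nums.length : Int), 0)).1)
                  (qstep queries i)).getD []).sum
                + (PySem.Dict.getD memo (qkey queries i) ((nums.length : Int), 0)).2) 1000000007),
             PySem.Dict.insert memo (qkey queries i) (qstart queries i, PySem.Int.mod
              (((PySem.List.slice? nums (some (qstart queries i))
                  (some (PySem.Dict.getD memo (qkey queries i) ((nums.length : Int), 0)).1)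
                  (qstep queries i)).getD []).sum
                + (PySem.Dict.getD memo (qkey queries i) ((nums.length : Int), 0)).2) 1000000007)) := rfl
      rw [hraw]
      unfold PySem.Dict.getD
      rw [hnone i (List.mem_cons_self), Option.getD_none]
      rw [(rfl : ((nums.length : Int), (0 : Int)).1 = (nums.length : Int)),
        (rfl : ((nums.length : Int), (0 : Int)).2 = (0 : Int)), add_zero,
        slice?_stop_len nums (qstart queries i) (qstep queries i) (by omega)]
    rw [htot]
    refine ih _ _ (fun j hj => hmem j (List.mem_cons_of_mem _ hj))
      (List.pairwise_cons.mp hpair).2 ?_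
    intro j hj
    rw [PySem.Dict.get?_insert_of_ne memo _
      (fun hc => (List.pairwise_cons.mp hpair).1 j hj hc.symm)]
    exact hnone j (List.mem_cons_of_mem _ hj)

lemma final_assembly_nodup (nums : List Int) (queries : List (List Int))
    (hq2 : ∀ q ∈ queries, q.length = 2 ∧ 1 ≤ q.getD 1 0)
    (hnd : (queries.map (fun q =>
      (PySem.Int.mod (q.getD 0 0) (q.getD 1 0), q.getD 1 0))).Nodup) :
    solve nums queries = solve_alt nums queries := by
  have hsolve : solve nums queries
      = ((PySem.List.sorted (PySem.List.pyRange 0 (queries.length : Int) 1)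
            (fun id => -(qstart queries id))).foldl (stepFn nums queries)
          (List.replicate queries.length 0, PySem.Dict.empty)).1 := rfl
  set order := PySem.List.sorted (PySem.List.pyRange 0 (queries.length : Int) 1)
      (fun id => -(qstart queries id)) with horder
  have horder_mem : ∀ j ∈ order, 0 ≤ j ∧ j < (queries.length : Int) := by
    intro j hj
    rw [horder, PySem.List.mem_sorted, PySem.List.mem_pyRange_one] at hj
    exact hj
  have hkey : ∀ (p : Nat) (hpn : p < queries.length), qkey queries (p : Int)
      = (PySem.Int.mod ((queries[p]'hpn).getD 0 0) ((queries[p]'hpn).getD 1 0),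
          (queries[p]'hpn).getD 1 0) := by
    intro p hpn
    have hq : PySem.List.pyGetD queries ((p : Nat) : Int) [] = queries[p] := by
      rw [PySem.List.pyGetD_natCast, List.getD_eq_getElem?_getD, List.getElem?_eq_getElem hpn,
        Option.getD_some]
    unfold qkey qstart qstep
    rw [hq, PySem.List.pyGetD_zero,
      (by norm_num : (1 : Int) = ((1 : Nat) : Int)), PySem.List.pyGetD_natCast]
  have hpairkey : order.Pairwise (fun i j => qkey queries i ≠ qkey queries j) := by
    have hrange : (PySem.List.pyRange 0 (queries.length : Int) 1).Pairwise
        (fun i j => qkey queries i ≠ qkey queries j) := by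
      rw [List.pairwise_iff_getElem]
      intro p q hp hq hpq
      rw [PySem.List.length_pyRange_one] at hp hq
      have hp' : p < queries.length := by omega
      have hq' : q < queries.length := by omega
      rw [PySem.List.getElem_pyRange_one, PySem.List.getElem_pyRange_one]
      have e1 : (0 : Int) + (p : Int) = ((p : Nat) : Int) := by omega
      have e2 : (0 : Int) + (q : Int) = ((q : Nat) : Int) := by omega
      rw [e1, e2, hkey p hp', hkey q hq']
      intro hc
      have h1 : (queries.map (fun q =>
          (PySem.Int.mod (q.getD 0 0) (q.getD 1 0), q.getD 1 0)))[p]'(by simpa using hp')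
          = (queries.map (fun q =>
          (PySem.Int.mod (q.getD 0 0) (q.getD 1 0), q.getD 1 0)))[q]'(by simpa using hq') := by
        simpa using hc
      exact absurd (hnd.getElem_inj_iff.mp h1) (by omega)
    exact ((PySem.List.sorted_perm _ _ _).symm.pairwise_iff
      (fun {a b} hab hc => hab hc.symm)).mp hrange
  have hnone0 : ∀ j ∈ order, (PySem.Dict.empty : PySem.Dict (Int × Int) (Int × Int)).get?
      (qkey queries j) = none := by
    intro j _; rfl
  rw [hsolve, fold_res_nodup_aux nums queries hq2 order _ _ horder_mem hpairkey hnone0]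
  apply List.ext_getElem?
  intro p
  by_cases hpn : p < queries.length
  · have hwr := writes_get (fun i => PySem.Int.mod
        ((PySem.List.slice? nums (some (qstart queries i)) none
          (qstep queries i)).getD []).sum 1000000007) order
      (List.replicate queries.length 0) p
      (fun j hj => (horder_mem j hj).1) (by rw [List.length_replicate]; exact hpn)
    rw [hwr]
    have hpmem : (p : Int) ∈ order := by
      rw [horder, PySem.List.mem_sorted, PySem.List.mem_pyRange_one]
      constructor <;> omega
    rw [if_pos hpmem]
    have hq : PySem.List.pyGetD queries ((p : Nat) : Int) [] = queries[p] := by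
      rw [PySem.List.pyGetD_natCast, List.getD_eq_getElem?_getD, List.getElem?_eq_getElem hpn,
        Option.getD_some]
    unfold solve_alt
    rw [List.getElem?_map, List.getElem?_eq_getElem hpn, Option.map_some]
    congr 1
    show PySem.Int.mod ((PySem.List.slice? nums
        (some (PySem.List.pyGetD (PySem.List.pyGetD queries ((p : Nat) : Int) []) 0 0)) none
        (PySem.List.pyGetD (PySem.List.pyGetD queries ((p : Nat) : Int) []) 1 0)).getD []).sum
        1000000007 = _
    rw [hq]
  · have hlenw : (order.foldl (fun r i => PySem.List.pySetD r i (PySem.Int.mod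
        ((PySem.List.slice? nums (some (qstart queries i)) none
          (qstep queries i)).getD []).sum 1000000007))
        (List.replicate queries.length (0 : Int))).length = queries.length := by
      simpa using writes_len _ order (List.replicate queries.length (0 : Int))
    rw [List.getElem?_eq_none (by omega), List.getElem?_eq_none
      (by simp only [solve_alt, List.length_map]; omega)]

-- ===== VERDICT (by name: the statement is the Claim_ definition above) =====
theorem solve_spec : Claim_equal_solve := by
  intro nums queries _ hpre
  unfold Spec_solve
  obtain ⟨hshape, hor⟩ := hpre
  rcases hor with hnil | hdom | ⟨hstep, hnd⟩
  · subst hnil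
    exact final_assembly_nil queries
  · exact final_assembly nums queries
      (fun q hq => ⟨(hshape q hq).1, (hdom q hq).1, (hdom q hq).2⟩)
  · exact final_assembly_nodup nums queries
      (fun q hq => ⟨(hshape q hq).1, hstep q hq⟩) hnd
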